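-- pv_equiv track=rewrite | github.com/PanDAWMS/panda-bigmon-atlas | atlas/reqtask/views.py | str_to_slices_range
-- ===== SOURCE A (Python) =====
-- def str_to_slices_range(range_str):
--     token = ''
--     slices = []
--     chain_start = -1
--     for ch in range_str:
--         if ch not in ['x','y']:
--             token += ch
--         else:
--             current_value = int(token,16)
--             token = ''
--             if ch == 'x':
--                 if chain_start != -1:
--                     raise ValueError('Wrong sequence to convert')
--                 chain_start = current_value
--             if ch == 'y':
--                 if chain_start != -1:
--                     slices += list(range(chain_start,current_value+1))
--                     chain_start =-1
--                 else:
--                     slices += [current_value]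
--     return slices
-- ===== SOURCE B (Python) =====
-- def str_to_slices_range(range_str):
--     i = next((k for k, c in enumerate(range_str) if c in 'xy'), -1)
--     if i == -1:
--         return []
--     v = int(range_str[:i], 16)
--     rest = range_str[i + 1:]
--     if range_str[i] == 'y':
--         return [v] + str_to_slices_range(rest)
--     j = next((k for k, c in enumerate(rest) if c in 'xy'), -1)
--     if j == -1:
--         return []
--     if rest[j] == 'x':
--         raise ValueError('Wrong sequence to convert')
--     w = int(rest[:j], 16)
--     return list(range(v, w + 1)) + str_to_slices_range(rest[j + 1:])
-- ===== Notes on version B (the rewrite author's own statement) =====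
-- stated objective: alternative
-- what changed: A is a single char-by-char state machine carrying (token, slices, chain_start=-1 sentinel); B recurses on the structure of the string, locating the first 'x'/'y' delimiter, parsing the slice before it, consuming a whole x..y chain pair at once and recursing on the remainder, with no token accumulator and no sentinel state.
-- outside the precondition, e.g. on str_to_slices_range('-1x5y'): A returns [5], B returns [-1, 0, 1, 2, 3, 4, 5]; on str_to_slices_range('-1x5x6y'): A returns [5, 6], B raises ValueError; on str_to_slices_range('-1x'): A returns [], B returns []
import Mathlib
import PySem

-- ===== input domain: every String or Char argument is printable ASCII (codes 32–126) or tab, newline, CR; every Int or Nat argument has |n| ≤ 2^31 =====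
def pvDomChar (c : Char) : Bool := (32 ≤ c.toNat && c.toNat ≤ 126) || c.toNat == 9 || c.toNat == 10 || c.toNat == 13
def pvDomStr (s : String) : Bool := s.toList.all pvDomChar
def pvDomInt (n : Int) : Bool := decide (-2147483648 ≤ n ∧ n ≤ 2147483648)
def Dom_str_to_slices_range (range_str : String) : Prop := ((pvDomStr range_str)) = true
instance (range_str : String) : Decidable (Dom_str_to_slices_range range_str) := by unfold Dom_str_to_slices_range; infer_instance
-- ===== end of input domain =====

-- B re-implements the parser as a recursion on the first 'x'/'y' delimiter (tokenize-by-find + recurse)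
-- instead of A's char-by-char sentinel state machine; objective: alternative decomposition, not speed.
-- Pre_ excludes inputs where A raises ValueError, and the sentinel-collision inputs where a token
-- preceding an 'x' parses to -1 (A's chain_start sentinel), on which A's value is an artefact and B
-- raises or returns the genuine range.


-- ===== PORT A =====
-- state = (token, slices, chain_start); none = ValueError was raised
def pvStepA (st : Option (List Char × List Int × Int)) (ch : Char) :
    Option (List Char × List Int × Int) :=
  match st with
  | none => none
  | some (token, slices, chainStart) =>
    if ¬ (ch = 'x' ∨ ch = 'y') then
      some (token ++ [ch], slices, chainStart)
    else
      match PySem.Int.ofCharsBase? token 16 with   -- int(token, 16)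
      | none => none
      | some currentValue =>
        if ch = 'x' then
          if chainStart ≠ -1 then none
          else some ([], slices, currentValue)
        else
          if chainStart ≠ -1 then
            some ([], slices ++ PySem.List.pyRange chainStart (currentValue + 1) 1, -1)
          else
            some ([], slices ++ [currentValue], -1)

def str_to_slices_range (range_str : String) : List Int :=
  match range_str.toList.foldl pvStepA (some ([], [], -1)) with
  | some (_, slices, _) => slices
  | none => []

-- ===== PORT B =====
def pvDelim (c : Char) : Bool := c == 'x' || c == 'y'

-- Source B's recursion: find the first delimiter, parse the text before it, recurse on the rest.
-- next((k for k,c in enumerate(s) if c in 'xy'), -1) is ported as List.findIdx? (none = -1).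
def pvGoB : List Char → Option (List Int)
  | l =>
    match _hi : l.findIdx? pvDelim with
    | none => some []
    | some i =>
      match PySem.Int.ofCharsBase? (l.take i) 16 with   -- int(range_str[:i], 16)
      | none => none
      | some v =>
        if l[i]? = some 'y' then
          (pvGoB (l.drop (i + 1))).map (fun t => [v] ++ t)
        else
          match (l.drop (i + 1)).findIdx? pvDelim with
          | none => some []
          | some j =>
            if (l.drop (i + 1))[j]? = some 'x' then none
            else
              match PySem.Int.ofCharsBase? ((l.drop (i + 1)).take j) 16 with
              | none => none
              | some w =>
                (pvGoB ((l.drop (i + 1)).drop (j + 1))).map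
                  (fun t => PySem.List.pyRange v (w + 1) 1 ++ t)
  termination_by l => l.length
  decreasing_by
  · have h2 := (List.findIdx?_eq_some_iff_findIdx_eq.mp _hi).1
    have : (List.drop (i + 1) l).length < l.length := by
      simp only [List.length_drop]; omega
    exact this
  · have h2 := (List.findIdx?_eq_some_iff_findIdx_eq.mp _hi).1
    have : (List.drop (j + 1) (List.drop (i + 1) l)).length < l.length := by
      simp only [List.length_drop]; omega
    exact this

def str_to_slices_range_alt (range_str : String) : List Int :=
  match pvGoB range_str.toList with
  | some t => t
  | none => []

-- ===== PRECONDITION & SPEC =====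
-- pvPairs tokenizes into (text-before-delimiter, delimiter) pairs, trailing text dropped
def pvPairs : List Char → List Char → List (List Char × Char)
  | _token, [] => []
  | token, c :: r => if pvDelim c then (token, c) :: pvPairs [] r else pvPairs (token ++ [c]) r

-- chain validity of the marker sequence: no 'x' while a chain is open
def pvMarksOK : List Char → Bool → Bool
  | [], _ => true
  | m :: ms, opn => if m = 'x' then (!opn) && pvMarksOK ms true else pvMarksOK ms false

-- Pre_ = A returns normally (every token before a delimiter is a valid base-16 int literal and no 'x'
-- arrives while a chain is open) AND no token preceding an 'x' parses to -1: on those last inputs A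
-- returns, but its value is an artefact of the chain_start = -1 sentinel (the open chain is forgotten),
-- and B raises or returns the genuine range there.
def Pre_str_to_slices_range (range_str : String) : Prop :=
  ((pvPairs [] range_str.toList).all
      (fun p => (PySem.Int.ofCharsBase? p.1 16).isSome)) = true
  ∧ pvMarksOK ((pvPairs [] range_str.toList).map (fun p => p.2)) false = true
  ∧ ((pvPairs [] range_str.toList).all
      (fun p => !(p.2 == 'x' && PySem.Int.ofCharsBase? p.1 16 == some (-1)))) = true

instance (range_str : String) : Decidable (Pre_str_to_slices_range range_str) := by
  unfold Pre_str_to_slices_range; infer_instance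

def pvWitness_str_to_slices_range : String := "1x3y a y-5y"

def Spec_str_to_slices_range (range_str : String) (out : List Int) : Prop :=
  out = str_to_slices_range_alt range_str
instance (range_str : String) (out : List Int) : Decidable (Spec_str_to_slices_range range_str out) := by
  unfold Spec_str_to_slices_range; infer_instance

-- ===== CLAIM (what is proved, stated in full; the proofs are below) =====
def Claim_equal_str_to_slices_range : Prop := ∀ (range_str : String), Dom_str_to_slices_range range_str → Pre_str_to_slices_range range_str → Spec_str_to_slices_range range_str (str_to_slices_range range_str)

-- ===== LEMMAS AND PROOFS =====

-- semantic interpreter of the pair list (reference both ports are related to)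
def pvInterp : List (List Char × Char) → Option (List Int)
  | [] => some []
  | (t, m) :: ps =>
    match PySem.Int.ofCharsBase? t 16 with
    | none => none
    | some v =>
      if m = 'y' then (pvInterp ps).map (fun r => v :: r)
      else
        match ps with
        | [] => some []
        | (t2, m2) :: ps' =>
          if m2 = 'x' then none
          else
            match PySem.Int.ofCharsBase? t2 16 with
            | none => none
            | some w => (pvInterp ps').map (fun r => PySem.List.pyRange v (w + 1) 1 ++ r)

theorem pvPairs_none {l : List Char} (h : l.findIdx? pvDelim = none) (token : List Char) :
    pvPairs token l = [] := by
  induction l generalizing token with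
  | nil => rfl
  | cons c r ih =>
    rw [List.findIdx?_cons] at h
    by_cases hc : pvDelim c = true
    · simp [hc] at h
    · simp only [hc] at h
      simp only [Bool.false_eq_true, if_false, Option.map_eq_none_iff] at h
      simp [pvPairs, hc, ih h]

theorem pvPairs_some {l : List Char} {i : Nat} (h : l.findIdx? pvDelim = some i) (token : List Char) :
    ∃ d, l[i]? = some d ∧ pvDelim d = true ∧
      pvPairs token l = (token ++ l.take i, d) :: pvPairs [] (l.drop (i + 1)) := by
  induction l generalizing token i with
  | nil => simp at h
  | cons c r ih =>
    rw [List.findIdx?_cons] at h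
    by_cases hc : pvDelim c = true
    · simp only [hc, if_true, Option.some.injEq] at h
      subst h
      exact ⟨c, by simp, hc, by simp [pvPairs, hc]⟩
    · simp only [hc, Bool.false_eq_true, if_false] at h
      obtain ⟨i', hi', rfl⟩ := Option.map_eq_some_iff.mp h
      obtain ⟨d, hd1, hd2, hd3⟩ := ih hi' (token ++ [c])
      refine ⟨d, by simpa using hd1, hd2, ?_⟩
      simp [pvPairs, hc, hd3, List.take_succ_cons, List.drop_succ_cons]

theorem pvGoB_eq_interp_aux : ∀ (n : Nat) (l : List Char), l.length ≤ n →
    pvGoB l = pvInterp (pvPairs [] l) := by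
  intro n
  induction n with
  | zero =>
    intro l hl
    have : l = [] := List.eq_nil_of_length_eq_zero (Nat.le_zero.mp hl)
    subst this
    rw [pvGoB]
    rfl
  | succ n ih =>
    intro l hl
    rw [pvGoB]
    cases h : l.findIdx? pvDelim with
    | none => rw [pvPairs_none h]; rfl
    | some i =>
      have hilen := (List.findIdx?_eq_some_iff_findIdx_eq.mp h).1
      obtain ⟨d, hd1, hd2, hd3⟩ := pvPairs_some h []
      rw [hd3]
      simp only [List.nil_append]
      cases hv : PySem.Int.ofCharsBase? (l.take i) 16 with
      | none => simp [pvInterp, hv]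
      | some v =>
        dsimp only
        have hrest : (l.drop (i + 1)).length ≤ n := by
          simp only [List.length_drop]; omega
        by_cases hy : d = 'y'
        · subst hy
          rw [hd1]
          simp only [pvInterp, hv]
          rw [ih _ hrest]
          cases pvInterp (pvPairs [] (l.drop (i + 1))) <;> simp
        · have hx : d = 'x' := by
            simp only [pvDelim, Bool.or_eq_true, beq_iff_eq] at hd2
            tauto
          subst hx
          rw [hd1]
          have hne : ¬ (some 'x' = some 'y') := by decide
          rw [if_neg hne]
          simp only [pvInterp, hv, if_neg (by decide : ¬ ('x' = 'y'))]
          cases h2 : (l.drop (i + 1)).findIdx? pvDelim with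
          | none => rw [pvPairs_none h2]
          | some j =>
            have hjlen := (List.findIdx?_eq_some_iff_findIdx_eq.mp h2).1
            obtain ⟨d2, he1, he2, he3⟩ := pvPairs_some h2 []
            rw [he3]
            simp only [List.nil_append]
            by_cases hx2 : d2 = 'x'
            · subst hx2
              rw [he1]
              simp
            · have hy2 : d2 = 'y' := by
                simp only [pvDelim, Bool.or_eq_true, beq_iff_eq] at he2
                tauto
              subst hy2
              rw [he1]
              rw [if_neg (by decide : ¬ (some 'y' = some 'x'))]
              rw [if_neg (by decide : ¬ ('y' = 'x'))]
              cases hw : PySem.Int.ofCharsBase? ((l.drop (i + 1)).take j) 16 with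
              | none => rfl
              | some w =>
                dsimp only
                have : ((l.drop (i + 1)).drop (j + 1)).length ≤ n := by
                  simp only [List.length_drop]; omega
                rw [ih _ this]

theorem pvGoB_eq_interp (l : List Char) : pvGoB l = pvInterp (pvPairs [] l) :=
  pvGoB_eq_interp_aux l.length l le_rfl

theorem pvFoldA_none (l : List Char) : l.foldl pvStepA none = none := by
  induction l with
  | nil => rfl
  | cons c r ih => simpa [pvStepA] using ih

theorem pvFoldA_clean {pre : List Char} (h : ∀ c ∈ pre, pvDelim c = false)
    (token : List Char) (slices : List Int) (cs : Int) :
    pre.foldl pvStepA (some (token, slices, cs)) = some (token ++ pre, slices, cs) := by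
  induction pre generalizing token with
  | nil => simp
  | cons c r ih =>
    have hc : pvDelim c = false := h c (by simp)
    have hc' : ¬ (c = 'x' ∨ c = 'y') := by
      simp only [pvDelim, Bool.or_eq_false_iff, beq_eq_false_iff_ne, ne_eq] at hc
      tauto
    simp only [List.foldl_cons, pvStepA, if_pos hc']
    rw [ih (fun d hd => h d (by simp [hd]))]
    simp

-- every character strictly before the first delimiter is not a delimiter
theorem pvTake_clean {l : List Char} {i : Nat} (h : l.findIdx? pvDelim = some i) :
    ∀ c ∈ l.take i, pvDelim c = false := by
  intro c hc
  obtain ⟨j, hj, hcj⟩ := List.getElem_of_mem hc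
  obtain ⟨hi, hpi, hmin⟩ := List.findIdx?_eq_some_iff_getElem.mp h
  have hlen : (l.take i).length = min i l.length := List.length_take
  have hj' : j < i := by omega
  have hgt : (l.take i)[j] = l[j]'(by omega) := List.getElem_take
  rw [hgt] at hcj
  subst hcj
  simpa using hmin j hj'

theorem pvFoldA_eq_interp_aux : ∀ (n : Nat) (l : List Char), l.length ≤ n →
    ∀ (slices : List Int),
    (∀ p ∈ pvPairs [] l, p.2 = 'x' → PySem.Int.ofCharsBase? p.1 16 ≠ some (-1)) →
    (l.foldl pvStepA (some ([], slices, -1))).map (fun st => st.2.1)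
      = (pvInterp (pvPairs [] l)).map (fun t => slices ++ t) := by
  intro n
  induction n with
  | zero =>
    intro l hl slices _
    have : l = [] := List.eq_nil_of_length_eq_zero (Nat.le_zero.mp hl)
    subst this
    simp [pvInterp, pvPairs]
  | succ n ih =>
    intro l hl slices hc
    cases h : l.findIdx? pvDelim with
    | none =>
      rw [pvPairs_none h]
      rw [pvFoldA_clean (List.findIdx?_eq_none_iff.mp h) [] slices (-1)]
      simp [pvInterp]
    | some i =>
      obtain ⟨d, hd1, hd2, hd3⟩ := pvPairs_some h []
      rw [hd3]
      simp only [List.nil_append]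
      obtain ⟨hilen, hdi⟩ := List.getElem?_eq_some_iff.mp hd1
      have hdec : l = l.take i ++ (d :: l.drop (i + 1)) := by
        conv_lhs => rw [← List.take_append_drop i l]
        rw [List.drop_eq_getElem_cons hilen, hdi]
      have hfold : l.foldl pvStepA (some ([], slices, -1))
          = (d :: l.drop (i + 1)).foldl pvStepA (some (l.take i, slices, -1)) := by
        conv_lhs => rw [hdec]
        rw [List.foldl_append, pvFoldA_clean (pvTake_clean h) [] slices (-1)]
        simp
      rw [hfold]
      have hdelim : ¬¬ (d = 'x' ∨ d = 'y') := by
        simp only [pvDelim, Bool.or_eq_true, beq_iff_eq] at hd2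
        tauto
      simp only [List.foldl_cons, pvStepA, if_neg hdelim]
      cases hv : PySem.Int.ofCharsBase? (l.take i) 16 with
      | none => rw [pvFoldA_none]; simp [pvInterp, hv]
      | some v =>
        dsimp only
        have hrlen : (l.drop (i + 1)).length ≤ n := by
          simp only [List.length_drop]; omega
        by_cases hy : d = 'y'
        · subst hy
          rw [if_neg (by decide : ¬ ('y' = 'x')), if_neg (by simp : ¬ ((-1 : Int) ≠ -1))]
          have hct : ∀ p ∈ pvPairs [] (l.drop (i + 1)), p.2 = 'x' →
              PySem.Int.ofCharsBase? p.1 16 ≠ some (-1) := by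
            intro p hp; exact hc p (by rw [hd3]; simp [hp])
          rw [ih _ hrlen (slices ++ [v]) hct]
          simp only [pvInterp, hv]
          cases pvInterp (pvPairs [] (l.drop (i + 1))) <;> simp
        · have hx : d = 'x' := by tauto
          subst hx
          rw [if_pos rfl]
          have hvne : v ≠ -1 := by
            have := hc (l.take i, 'x') (by rw [hd3]; simp) rfl
            simp only [hv] at this
            intro hveq; exact this (by rw [hveq])
          rw [if_neg (by simp : ¬ ((-1 : Int) ≠ -1))]
          simp only [pvInterp, hv, if_neg (by decide : ¬ ('x' = 'y'))]
          -- decompose the rest at its first delimiter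
          cases h2 : (l.drop (i + 1)).findIdx? pvDelim with
          | none =>
            rw [pvPairs_none h2]
            rw [pvFoldA_clean (List.findIdx?_eq_none_iff.mp h2) [] slices v]
            simp
          | some j =>
            obtain ⟨d2, he1, he2, he3⟩ := pvPairs_some h2 []
            rw [he3]
            simp only [List.nil_append]
            obtain ⟨hjlen, hdj⟩ := List.getElem?_eq_some_iff.mp he1
            have hdec2 : l.drop (i + 1)
                = (l.drop (i + 1)).take j ++ (d2 :: (l.drop (i + 1)).drop (j + 1)) := by
              conv_lhs => rw [← List.take_append_drop j (l.drop (i + 1))]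
              rw [List.drop_eq_getElem_cons hjlen, hdj]
            have hfold2 : (l.drop (i + 1)).foldl pvStepA (some ([], slices, v))
                = (d2 :: (l.drop (i + 1)).drop (j + 1)).foldl pvStepA
                    (some ((l.drop (i + 1)).take j, slices, v)) := by
              conv_lhs => rw [hdec2]
              rw [List.foldl_append, pvFoldA_clean (pvTake_clean h2) [] slices v]
              simp
            rw [hfold2]
            have hdelim2 : ¬¬ (d2 = 'x' ∨ d2 = 'y') := by
              simp only [pvDelim, Bool.or_eq_true, beq_iff_eq] at he2
              tauto
            simp only [List.foldl_cons, pvStepA, if_neg hdelim2]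
            cases hw : PySem.Int.ofCharsBase? ((l.drop (i + 1)).take j) 16 with
            | none =>
              rw [pvFoldA_none]
              by_cases hx2 : d2 = 'x'
              · subst hx2; simp
              · have hy2 : d2 = 'y' := by tauto
                subst hy2
                rw [if_neg (by decide : ¬ ('y' = 'x'))]
                simp
            | some w =>
              dsimp only
              by_cases hx2 : d2 = 'x'
              · subst hx2
                rw [if_pos rfl, if_pos hvne, pvFoldA_none]
                simp
              · have hy2 : d2 = 'y' := by tauto
                subst hy2
                rw [if_neg (by decide : ¬ ('y' = 'x')), if_pos hvne]
                have hr2len : ((l.drop (i + 1)).drop (j + 1)).length ≤ n := by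
                  simp only [List.length_drop]; omega
                have hct2 : ∀ p ∈ pvPairs [] ((l.drop (i + 1)).drop (j + 1)), p.2 = 'x' →
                    PySem.Int.ofCharsBase? p.1 16 ≠ some (-1) := by
                  intro p hp
                  apply hc p
                  rw [hd3, he3]
                  simp only [List.mem_cons]
                  exact Or.inr (Or.inr hp)
                rw [ih _ hr2len (slices ++ PySem.List.pyRange v (w + 1) 1) hct2]
                cases pvInterp (pvPairs [] ((l.drop (i + 1)).drop (j + 1))) <;> simp

theorem pvFoldA_eq_interp (l : List Char) (slices : List Int)
    (hc : ∀ p ∈ pvPairs [] l, p.2 = 'x' → PySem.Int.ofCharsBase? p.1 16 ≠ some (-1)) :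
    (l.foldl pvStepA (some ([], slices, -1))).map (fun st => st.2.1)
      = (pvInterp (pvPairs [] l)).map (fun t => slices ++ t) :=
  pvFoldA_eq_interp_aux l.length l le_rfl slices hc

-- ===== VERDICT (by name: the statement is the Claim_ definition above) =====
theorem str_to_slices_range_spec : Claim_equal_str_to_slices_range := by
  intro s _hdom hpre
  obtain ⟨_ha, _hb, hc3⟩ := hpre
  show str_to_slices_range s = str_to_slices_range_alt s
  unfold str_to_slices_range str_to_slices_range_alt
  have hc : ∀ p ∈ pvPairs [] s.toList, p.2 = 'x' →
      PySem.Int.ofCharsBase? p.1 16 ≠ some (-1) := by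
    intro p hp hx heq
    have := (List.all_eq_true.mp hc3) p hp
    simp [hx, heq] at this
  have hmain := pvFoldA_eq_interp s.toList [] hc
  rw [← pvGoB_eq_interp] at hmain
  simp only [List.nil_append] at hmain
  cases hA : s.toList.foldl pvStepA (some ([], [], -1)) with
  | none =>
    rw [hA] at hmain
    cases hB : pvGoB s.toList with
    | none => rfl
    | some t => rw [hB] at hmain; simp at hmain
  | some st =>
    rw [hA] at hmain
    cases hB : pvGoB s.toList with
    | none => rw [hB] at hmain; simp at hmain
    | some t =>
      rw [hB] at hmain
      simp only [Option.map_some, Option.some.injEq] at hmain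
      simpa using hmain
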